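-- pv_equiv track=rewrite | github.com/sujin-kk/algorithm | Programmers/Level1/과일장수/solution.py | solution
-- ===== SOURCE A (Python) =====
-- def solution(k, m, score):
--     answer = 0
--     score.sort(reverse=True)
--     boxes = []
--
--     for i in range(len(score)):
--         boxes.append(score[i])
--         if (i + 1) % m == 0:
--             answer += min(boxes) * m
--             boxes = []
--
--     return answer
-- ===== SOURCE B (Python) =====
-- def solution(k, m, score):
--     # Sort descending; each complete box of m apples is priced by its last
--     # (= lowest) score, so just sum every m-th element and scale once by m.
--     score.sort(reverse=True)
--     total = 0
--     for j in range(len(score) // m):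
--         total += score[j * m + m - 1]
--     return m * total
-- ===== Notes on version B (the rewrite author's own statement) =====
-- stated objective: simpler
-- what changed: Instead of accumulating a boxes buffer and scanning it with min() at each block boundary, B strides through the descending-sorted list adding each complete block's last element (its minimum) and multiplies once by m; Pre_ restricts to the task's natural domain of a positive box size m, excluding m = 0 (A raises on nonempty score and returns 0 only for the accidental empty-score case) and m < 0 (A's negative-modulus block sums are artefacts outside the problem's meaning).
-- outside the precondition, e.g. on solution(1, 0, []): A returns 0, B raises ZeroDivisionError; on solution(1, -2, [3, 1, 4, 1]): A returns -8, B returns 0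
import Mathlib
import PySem

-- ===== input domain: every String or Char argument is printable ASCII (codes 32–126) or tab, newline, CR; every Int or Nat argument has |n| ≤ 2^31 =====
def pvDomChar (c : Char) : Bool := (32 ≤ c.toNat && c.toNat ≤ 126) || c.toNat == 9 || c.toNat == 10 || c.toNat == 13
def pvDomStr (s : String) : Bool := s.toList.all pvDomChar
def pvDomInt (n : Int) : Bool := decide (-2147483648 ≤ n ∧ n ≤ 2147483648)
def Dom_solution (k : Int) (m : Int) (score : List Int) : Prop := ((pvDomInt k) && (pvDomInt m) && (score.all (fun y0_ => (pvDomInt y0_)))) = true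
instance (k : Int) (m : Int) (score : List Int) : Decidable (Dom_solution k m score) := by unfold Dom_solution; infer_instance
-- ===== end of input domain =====

-- B replaces A's boxes buffer + min() scan by directly summing each complete descending
-- block's last element (its minimum); objective: simpler. Both A and B sort `score` in
-- place in Python (identical mutation); the equivalence proved is about the return value.

-- ===== PORT A =====
-- loop body of A's for-loop: state (answer, boxes), index i
def solStepA (m : Int) (sorted : List Int) (st : Int × List Int) (i : Int) : Int × List Int :=
  let boxes := st.2 ++ [PySem.List.pyGetD sorted i 0]
  if PySem.Int.mod (i + 1) m = 0 then
    (st.1 + (PySem.List.min? boxes (fun x => x)).getD 0 * m, [])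
  else
    (st.1, boxes)

def solution (k : Int) (m : Int) (score : List Int) : Int :=
  let sorted := PySem.List.sorted score (fun x => x) true
  ((PySem.List.pyRange 0 (sorted.length : Int) 1).foldl (solStepA m sorted) (0, [])).1

-- ===== PORT B =====
def solution_alt (k : Int) (m : Int) (score : List Int) : Int :=
  let sorted := PySem.List.sorted score (fun x => x) true
  let total := (PySem.List.pyRange 0 (PySem.Int.floordiv (sorted.length : Int) m) 1).foldl
      (fun total j => total + PySem.List.pyGetD sorted (j * m + m - 1) 0) 0
  m * total

-- ===== PRECONDITION & SPEC =====
-- Pre_ restricts to the task's natural domain of a positive box size m: it excludes m = 0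
-- (A raises ZeroDivisionError on nonempty score, returning 0 only in the accidental
-- empty-score case) and m < 0, where A's negative-modulus block sums are artefacts with
-- no meaning for the fruit-box problem.
def Pre_solution (k : Int) (m : Int) (score : List Int) : Prop := 1 ≤ m
instance (k : Int) (m : Int) (score : List Int) : Decidable (Pre_solution k m score) := by
  unfold Pre_solution; infer_instance

def pvWitness_solution : Int × Int × List Int := (1, 2, [3, 1, 4])

def Spec_solution (k : Int) (m : Int) (score : List Int) (out : Int) : Prop := out = solution_alt k m score
instance (k : Int) (m : Int) (score : List Int) (out : Int) : Decidable (Spec_solution k m score out) := by unfold Spec_solution; infer_instance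

-- ===== CLAIM (what is proved, stated in full; the proofs are below) =====
def Claim_equal_solution : Prop := ∀ (k : Int) (m : Int) (score : List Int), Dom_solution k m score → Pre_solution k m score → Spec_solution k m score (solution k m score)

-- ===== LEMMAS AND PROOFS =====

-- A's loop body on an (index, value) pair (for folding over `enumerate`)
def fA (m : Int) (st : Int × List Int) (p : Int × Int) : Int × List Int :=
  let boxes := st.2 ++ [p.2]
  if PySem.Int.mod (p.1 + 1) m = 0 then
    (st.1 + (PySem.List.min? boxes (fun x => x)).getD 0 * m, [])
  else
    (st.1, boxes)

lemma foldA_enum (m : Int) (l : List Int) (init : Int × List Int) :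
    (PySem.List.pyRange 0 (l.length : Int) 1).foldl (solStepA m l) init
      = (PySem.List.enumerate l 0).foldl (fA m) init := by
  rw [PySem.List.enumerate_eq_map_pyRange (d := 0), List.foldl_map]
  simp [PySem.List.len_eq]
  rfl

lemma cond_iff (m i : Int) : PySem.Int.mod (i + 1) m = 0 ↔ ((m.natAbs : Int)) ∣ (i + 1) := by
  rw [PySem.Int.mod_eq_zero_iff_dvd, Int.natAbs_dvd]

lemma foldl_fA_nofire (m : Int) (L : List (Int × Int)) :
    ∀ (acc : Int) (b : List Int),
      (∀ p ∈ L, ¬ PySem.Int.mod (p.1 + 1) m = 0) →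
      L.foldl (fA m) (acc, b) = (acc, b ++ L.map (·.2)) := by
  induction L with
  | nil => intro acc b _; simp
  | cons p L ih =>
    intro acc b h
    have hp : ¬ PySem.Int.mod (p.1 + 1) m = 0 := h p (by simp)
    simp only [List.foldl_cons]
    have : fA m (acc, b) p = (acc, b ++ [p.2]) := by simp [fA, hp]
    rw [this, ih _ _ (fun q hq => h q (by simp [hq]))]
    simp

lemma min_getD_of_desc (t : List Int) (h : t ≠ []) (hp : t.Pairwise (fun a b => b ≤ a)) :
    (PySem.List.min? t (fun x => x)).getD 0 = t.getLast h := by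
  obtain ⟨v, hv⟩ : ∃ v, PySem.List.min? t (fun x => x) = some v := by
    cases hmin : PySem.List.min? t (fun x => x) with
    | none => exact absurd ((PySem.List.min?_eq_none_iff t (fun x => x)).mp hmin) h
    | some v => exact ⟨v, rfl⟩
  rw [hv]; simp only [Option.getD_some]
  have hvmem : v ∈ t := PySem.List.min?_mem hv
  have hvmin : ∀ y ∈ t, v ≤ y := PySem.List.min?_isMin hv
  have h1 : v ≤ t.getLast h := hvmin _ (List.getLast_mem h)
  have h2 : t.getLast h ≤ v := by
    obtain ⟨p, hplt, hpe⟩ := List.mem_iff_getElem.mp hvmem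
    rw [List.getLast_eq_getElem]
    rcases lt_or_eq_of_le (Nat.le_sub_one_of_lt hplt) with hlt | heq
    · have := List.pairwise_iff_getElem.mp hp p (t.length - 1) hplt (by omega) hlt
      rw [hpe] at this; exact this
    · refine le_of_eq ?_
      rw [← hpe]
      congr 1
      omega
  exact le_antisymm h1 h2

lemma blocks (m : Int) (hm : m ≠ 0) :
    ∀ (q : Nat) (l : List Int), l.length ≤ q → l.Pairwise (fun a b => b ≤ a) →
    ∀ (i0 acc : Int), ((m.natAbs : Int)) ∣ i0 →
    ((PySem.List.enumerate l i0).foldl (fA m) (acc, [])).1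
      = acc + m * ((List.range (l.length / m.natAbs)).map
          (fun j => l.getD (j * m.natAbs + m.natAbs - 1) 0)).sum := by
  intro q
  induction q with
  | zero =>
    intro l hl _ i0 acc _
    have hnil : l = [] := List.eq_nil_of_length_eq_zero (Nat.le_zero.mp hl)
    subst hnil
    simp [PySem.List.enumerate]
  | succ q ih =>
    intro l hl hp i0 acc hd
    have hs : 0 < m.natAbs := Int.natAbs_pos.mpr hm
    by_cases hlen : l.length < m.natAbs
    · rw [foldl_fA_nofire]
      · have hq : l.length / m.natAbs = 0 := Nat.div_eq_of_lt hlen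
        simp [hq]
      · intro p hpmem hcond
        have h1 : p.1 ∈ (PySem.List.enumerate l i0).map (·.1) := List.mem_map_of_mem hpmem
        rw [PySem.List.map_fst_enumerate] at h1
        obtain ⟨hlo, hhi⟩ := (PySem.List.mem_pyRange_one).mp h1
        have hdvd : ((m.natAbs : Int)) ∣ (p.1 + 1) := (cond_iff m p.1).mp hcond
        have hdvd2 : ((m.natAbs : Int)) ∣ (p.1 + 1 - i0) := Int.dvd_sub hdvd hd
        have hle : ((m.natAbs : Int)) ≤ p.1 + 1 - i0 := Int.le_of_dvd (by omega) hdvd2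
        have : p.1 + 1 - i0 ≤ (l.length : Int) := by omega
        omega
    · have hsl : m.natAbs ≤ l.length := by omega
      have hl_eq : l = l.take m.natAbs ++ l.drop m.natAbs := (List.take_append_drop _ l).symm
      have ht_len : (l.take m.natAbs).length = m.natAbs := by
        rw [List.length_take]; omega
      have ht_ne : l.take m.natAbs ≠ [] := by
        intro hc; rw [hc] at ht_len; simp at ht_len; omega
      have ht_split : l.take m.natAbs
          = (l.take m.natAbs).dropLast ++ [(l.take m.natAbs).getLast ht_ne] :=
        (List.dropLast_append_getLast ht_ne).symm
      have hdl_len : ((l.take m.natAbs).dropLast).length = m.natAbs - 1 := by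
        rw [List.length_dropLast, ht_len]
      -- unfold one block
      conv_lhs => rw [hl_eq, PySem.List.enumerate_append, List.foldl_append]
      have hfirst :
          ((PySem.List.enumerate (l.take m.natAbs) i0).foldl (fA m) (acc, []))
            = (acc + (l.take m.natAbs).getLast ht_ne * m, []) := by
        have hno : ∀ p ∈ PySem.List.enumerate ((l.take m.natAbs).dropLast) i0,
            ¬ PySem.Int.mod (p.1 + 1) m = 0 := by
          intro p hpmem hcond
          have h1 : p.1 ∈ (PySem.List.enumerate ((l.take m.natAbs).dropLast) i0).map (·.1) :=
            List.mem_map_of_mem hpmem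
          rw [PySem.List.map_fst_enumerate] at h1
          obtain ⟨hlo, hhi⟩ := (PySem.List.mem_pyRange_one).mp h1
          rw [hdl_len] at hhi
          have hdvd : ((m.natAbs : Int)) ∣ (p.1 + 1) := (cond_iff m p.1).mp hcond
          have hdvd2 : ((m.natAbs : Int)) ∣ (p.1 + 1 - i0) := Int.dvd_sub hdvd hd
          have hle : ((m.natAbs : Int)) ≤ p.1 + 1 - i0 := Int.le_of_dvd (by omega) hdvd2
          have hcast : ((m.natAbs - 1 : Nat) : Int) = (m.natAbs : Int) - 1 := by
            push_cast [Nat.cast_sub hs]; ring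
          rw [hcast] at hhi
          omega
        conv_lhs => rw [ht_split, PySem.List.enumerate_append, List.foldl_append]
        rw [foldl_fA_nofire m _ acc [] hno, PySem.List.map_snd_enumerate, List.nil_append]
        rw [PySem.List.enumerate_cons, PySem.List.enumerate_nil]
        simp only [List.foldl_cons, List.foldl_nil]
        have hfire : PySem.Int.mod ((i0 + (((l.take m.natAbs).dropLast).length : Int)) + 1) m
            = 0 := by
          rw [cond_iff, hdl_len]
          have hcast : ((m.natAbs - 1 : Nat) : Int) = (m.natAbs : Int) - 1 := by
            push_cast [Nat.cast_sub hs]; ring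
          rw [hcast]
          have harith : i0 + ((m.natAbs : Int) - 1) + 1 = i0 + (m.natAbs : Int) := by ring
          rw [harith]
          exact dvd_add hd dvd_rfl
        simp only [fA, hfire, if_pos]
        have hboxes : (l.take m.natAbs).dropLast ++ [(l.take m.natAbs).getLast ht_ne]
            = l.take m.natAbs := List.dropLast_append_getLast ht_ne
        rw [hboxes, min_getD_of_desc (l.take m.natAbs) ht_ne
          (hp.sublist (List.take_sublist _ _))]
      rw [hfirst, ht_len]
      have hr := ih (l.drop m.natAbs) (by rw [List.length_drop]; omega)
        (hp.sublist (List.drop_sublist _ _)) (i0 + (m.natAbs : Int))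
        (acc + (l.take m.natAbs).getLast ht_ne * m) (dvd_add hd dvd_rfl)
      rw [hr]
      -- arithmetic of the stride sum
      have hlen_split : l.length = m.natAbs + (l.drop m.natAbs).length := by
        rw [List.length_drop]; omega
      have hdiv : l.length / m.natAbs = (l.drop m.natAbs).length / m.natAbs + 1 := by
        rw [hlen_split, Nat.add_comm, Nat.add_div_right _ hs]
      rw [hdiv, List.range_succ_eq_map, List.map_cons, List.sum_cons]
      have hg0 : l.getD (0 * m.natAbs + m.natAbs - 1) 0 = (l.take m.natAbs).getLast ht_ne := by
        have hidx : 0 * m.natAbs + m.natAbs - 1 = m.natAbs - 1 := by omega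
        rw [hidx, List.getLast_eq_getElem, List.getD_eq_getElem _ _ (by omega)]
        simp only [ht_len]
        exact (List.getElem_take).symm
      have hshift : ((List.range ((l.drop m.natAbs).length / m.natAbs)).map Nat.succ).map
            (fun j => l.getD (j * m.natAbs + m.natAbs - 1) 0)
          = (List.range ((l.drop m.natAbs).length / m.natAbs)).map
            (fun j => (l.drop m.natAbs).getD (j * m.natAbs + m.natAbs - 1) 0) := by
        rw [List.map_map]
        apply List.map_congr_left
        intro j _
        simp only [Function.comp_apply, Nat.succ_eq_add_one]
        have hidx : (j + 1) * m.natAbs + m.natAbs - 1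
            = m.natAbs + (j * m.natAbs + m.natAbs - 1) := by
          have h1 : (j + 1) * m.natAbs = j * m.natAbs + m.natAbs := by ring
          omega
        rw [hidx]
        conv_lhs => rw [hl_eq]
        rw [List.getD_append_right _ _ _ _ (by rw [ht_len]; omega), ht_len]
        congr 1
        omega
      rw [hg0, hshift]
      ring
  -- end blocks

lemma alt_eq (k m : Int) (hm : 1 ≤ m) (score : List Int) :
    solution_alt k m score
      = m * ((List.range ((PySem.List.sorted score (fun x => x) true).length / m.natAbs)).map
          (fun j => (PySem.List.sorted score (fun x => x) true).getD
            (j * m.natAbs + m.natAbs - 1) 0)).sum := by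
  unfold solution_alt
  have hs : 0 < m.natAbs := Int.natAbs_pos.mpr (by omega)
  have habs : m = ((m.natAbs : Nat) : Int) := (Int.natAbs_of_nonneg (by omega)).symm
  conv_lhs => rw [habs]
  simp only [PySem.Int.floordiv_natCast, PySem.List.pyRange_one, sub_zero, Int.toNat_natCast]
  rw [List.foldl_map, PySem.List.foldl_add]
  rw [zero_add]
  congr 1
  · exact habs.symm
  congr 1
  apply List.map_congr_left
  intro j _
  have hidx : (0 + (j : Int)) * (m.natAbs : Int) + (m.natAbs : Int) - 1
      = ((j * m.natAbs + m.natAbs - 1 : Nat) : Int) := by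
    push_cast [Nat.cast_sub (show 1 ≤ j * m.natAbs + m.natAbs by omega)]
    ring
  rw [hidx, PySem.List.pyGetD_natCast]

-- ===== VERDICT (by name: the statement is the Claim_ definition above) =====
theorem solution_spec : Claim_equal_solution := by
  intro k m score _ hm
  unfold Pre_solution at hm
  unfold Spec_solution
  have hsol : solution k m score
      = ((PySem.List.pyRange 0 ((PySem.List.sorted score (fun x => x) true).length : Int) 1).foldl
          (solStepA m (PySem.List.sorted score (fun x => x) true)) (0, [])).1 := rfl
  rw [hsol]
  have hp : (PySem.List.sorted score (fun x => x) true).Pairwise (fun a b => b ≤ a) := by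
    have := PySem.List.sorted_pairwise_rev score (fun x => x)
    simpa using this
  rw [foldA_enum, blocks m (by omega) (PySem.List.sorted score (fun x => x) true).length
    (PySem.List.sorted score (fun x => x) true) le_rfl hp 0 0 (dvd_zero _)]
  rw [alt_eq k m hm score]
  ring
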